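-- pv_equiv track=rewrite | github.com/louislau1129/CoMFLP | search_strategy/get_corr.py | regulate_clip_layers_list
-- ===== SOURCE A (Python) =====
-- def regulate_clip_layers_list(clip_layers):
--     """
--     clip_layers: [1,2,3,6,7,9] --> [[1,3], [6,7], [9,9]]
--     """
--     num_clip_layers = len(clip_layers)
--
--     regulated_clip_layers = []
--     start_layer = clip_layers[0]
--     for i in range(0, num_clip_layers-1):
--         if clip_layers[i+1] == clip_layers[i]+1:
--             continue
--         else:
--             regulated_clip_layers.append([start_layer, clip_layers[i]])
--             start_layer = clip_layers[i+1]
--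
--     regulated_clip_layers.append([start_layer, clip_layers[-1]])
--     return regulated_clip_layers
-- ===== SOURCE B (Python) =====
-- def regulate_clip_layers_list(clip_layers):
--     pairs = list(zip(clip_layers, clip_layers[1:]))
--     starts = [clip_layers[0]] + [c for p, c in pairs if c != p + 1]
--     ends = [p for p, c in pairs if c != p + 1] + [clip_layers[-1]]
--     return [[s, e] for s, e in zip(starts, ends)]
-- ===== Notes on version B (the rewrite author's own statement) =====
-- stated objective: alternative
-- what changed: B drops A's stateful scan (running start + trailing append) and instead builds the run boundaries declaratively: it zips the list with its own tail, filters the adjacent pairs that break consecutiveness, takes their second components (prefixed by the first element) as run starts and their first components (suffixed by the last element) as run ends, and zips starts with ends into intervals; on the empty list both A and B raise IndexError (excluded by Pre_).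
import Mathlib
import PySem

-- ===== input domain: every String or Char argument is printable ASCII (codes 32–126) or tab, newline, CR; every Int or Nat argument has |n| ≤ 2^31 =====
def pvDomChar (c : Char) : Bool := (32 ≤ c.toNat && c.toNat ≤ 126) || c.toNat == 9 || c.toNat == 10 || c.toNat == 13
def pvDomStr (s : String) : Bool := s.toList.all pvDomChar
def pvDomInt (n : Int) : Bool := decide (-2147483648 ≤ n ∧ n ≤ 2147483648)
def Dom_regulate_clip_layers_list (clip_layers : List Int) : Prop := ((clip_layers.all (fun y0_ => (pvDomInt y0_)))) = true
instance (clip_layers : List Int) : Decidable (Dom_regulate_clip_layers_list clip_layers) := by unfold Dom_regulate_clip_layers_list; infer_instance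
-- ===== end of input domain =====

-- B replaces A's stateful gap-detection scan (running start + trailing append) by a
-- declarative construction: filter the adjacent-pair breaks out of zip(xs, xs[1:]) to get
-- run starts and run ends, then zip them into intervals; same O(n) cost;
-- A raises IndexError on [] (excluded by Pre_), and so does B.


-- ===== PORT A =====
-- A's loop over i in range(0, n-1) compares clip_layers[i+1] with clip_layers[i];
-- rendered as structural recursion over the consecutive elements with the same state
-- (regulated_clip_layers, start_layer) plus the current element.
def aLoop : List (List Int) → Int → Int → List Int → List (List Int) × Int × Int
  | regs, start, cur, [] => (regs, start, cur)
  | regs, start, cur, next :: rest =>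
      if next = cur + 1 then aLoop regs start next rest
      else aLoop (regs ++ [[start, cur]]) next next rest

def regulate_clip_layers_list (clip_layers : List Int) : List (List Int) :=
  match clip_layers with
  | [] => []  -- A raises IndexError here (indexing the first element); excluded by Pre_
  | x :: xs =>
      let (regs, start, cur) := aLoop [] x x xs  -- cur ends as clip_layers[-1]
      regs ++ [[start, cur]]

-- ===== PORT B =====
-- pairs = zip of the list with its tail; starts = first element prefixed to the breaks' second
-- components; ends = the breaks' first components suffixed by the last element; result zips them.
-- The first/last element reads go through pyGet? (getD default unreachable: Pre_ excludes []).
def regulate_clip_layers_list_alt (clip_layers : List Int) : List (List Int) :=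
  let pairs := clip_layers.zip (PySem.List.slice clip_layers (some 1) none)
  let breaks := pairs.filter (fun pc => pc.2 ≠ pc.1 + 1)
  let starts := ((PySem.List.pyGet? clip_layers 0).getD 0) :: breaks.map Prod.snd
  let ends := breaks.map Prod.fst ++ [(PySem.List.pyGet? clip_layers (-1)).getD 0]
  (starts.zip ends).map (fun se => [se.1, se.2])

-- ===== PRECONDITION & SPEC =====
-- Both A and B index clip_layers[0] (and [-1]), which raises IndexError on the empty list; Pre_ excludes exactly that.
def Pre_regulate_clip_layers_list (clip_layers : List Int) : Prop := clip_layers ≠ []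
instance (clip_layers : List Int) : Decidable (Pre_regulate_clip_layers_list clip_layers) := by unfold Pre_regulate_clip_layers_list; infer_instance
def pvWitness_regulate_clip_layers_list : List Int := [1, 2, 3, 6, 7, 9]

def Spec_regulate_clip_layers_list (clip_layers : List Int) (out : List (List Int)) : Prop := out = regulate_clip_layers_list_alt clip_layers
instance (clip_layers : List Int) (out : List (List Int)) : Decidable (Spec_regulate_clip_layers_list clip_layers out) := by unfold Spec_regulate_clip_layers_list; infer_instance

-- ===== CLAIM (what is proved, stated in full; the proofs are below) =====
def Claim_equal_regulate_clip_layers_list : Prop := ∀ (clip_layers : List Int), Dom_regulate_clip_layers_list clip_layers → Pre_regulate_clip_layers_list clip_layers → Spec_regulate_clip_layers_list clip_layers (regulate_clip_layers_list clip_layers)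

-- ===== LEMMAS AND PROOFS =====

-- canonical recursive description of the run decomposition, used as the bridge between the two ports
def runSplit : Int → List Int → Int × List Int
  | prev, [] => (prev, [])
  | prev, y :: ys => if y = prev + 1 then runSplit y ys else (prev, y :: ys)

theorem runSplit_len : ∀ (xs : List Int) (p : Int), (runSplit p xs).2.length ≤ xs.length := by
  intro xs
  induction xs with
  | nil => intro p; simp [runSplit]
  | cons y ys ih =>
      intro p
      simp only [runSplit]
      split
      · exact Nat.le_trans (ih y) (Nat.le_succ _)
      · simp

def altGo : List Int → List (List Int)
  | [] => []
  | x :: xs => [x, (runSplit x xs).1] :: altGo (runSplit x xs).2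
termination_by l => l.length
decreasing_by
  simp only [List.length_cons]
  exact Nat.lt_succ_of_le (runSplit_len xs x)

theorem altGo_eq (x : Int) (xs : List Int) :
    altGo (x :: xs) = [x, (runSplit x xs).1] :: altGo (runSplit x xs).2 := by
  simp only [altGo]

theorem aLoop_eq_altGo : ∀ (xs : List Int) (regs : List (List Int)) (start cur : Int),
    (aLoop regs start cur xs).1 ++ [[(aLoop regs start cur xs).2.1, (aLoop regs start cur xs).2.2]]
      = regs ++ ([start, (runSplit cur xs).1] :: altGo (runSplit cur xs).2) := by
  intro xs
  induction xs with
  | nil => intro regs start cur; simp only [aLoop, runSplit, altGo]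
  | cons y ys ih =>
      intro regs start cur
      by_cases h : y = cur + 1
      · simp only [aLoop, runSplit, if_pos h]
        exact ih regs start y
      · simp only [aLoop, runSplit, if_neg h]
        rw [ih (regs ++ [[start, cur]]) y y, altGo_eq]
        simp

-- B-side abbreviations for the proof
def bBreaks (xs : List Int) : List (Int × Int) :=
  (xs.zip xs.tail).filter (fun pc => pc.2 ≠ pc.1 + 1)

theorem bBreaks_cons (x y : Int) (t : List Int) :
    bBreaks (x :: y :: t) =
      (if y = x + 1 then [] else [(x, y)]) ++ bBreaks (y :: t) := by
  by_cases h : y = x + 1 <;> simp [bBreaks, h]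

theorem getLast_cons_cons (x y : Int) (t : List Int) :
    (PySem.List.pyGet? (x :: y :: t) (-1)).getD 0 = (PySem.List.pyGet? (y :: t) (-1)).getD 0 := by
  simp [PySem.List.pyGet?_neg_one, List.getLast?_cons_cons]

-- the central bridge: B's zip of starts and ends equals the canonical run decomposition
theorem b_zip_eq_altGo : ∀ (ys : List Int) (x : Int),
    (((x :: (bBreaks (x :: ys)).map Prod.snd).zip
        ((bBreaks (x :: ys)).map Prod.fst ++ [(PySem.List.pyGet? (x :: ys) (-1)).getD 0])).map
      (fun se => [se.1, se.2]))
      = altGo (x :: ys) := by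
  intro ys
  induction ys with
  | nil =>
      intro x
      simp [bBreaks, altGo, runSplit, PySem.List.pyGet?_neg_one]
  | cons y t ih =>
      intro x
      have hy := ih y
      rw [altGo_eq] at hy
      rw [bBreaks_cons, getLast_cons_cons, altGo_eq]
      by_cases h : y = x + 1
      · -- run continues: same zip as for (y :: t) but with head start replaced by x
        rw [if_pos h]
        simp only [List.nil_append]
        have hrs : runSplit x (y :: t) = runSplit y t := by
          simp only [runSplit, if_pos h]
        rw [hrs]
        cases hB : bBreaks (y :: t) with
        | nil =>
            simp only [hB, List.map_nil, List.nil_append, List.zip_cons_cons,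
              List.zip_nil_left, List.map_cons, List.map_nil] at hy ⊢
            injection hy with ha hb
            injection ha with h1 h2
            rw [h2, ← hb]
        | cons b bs =>
            simp only [hB, List.map_cons, List.cons_append, List.zip_cons_cons,
              List.map_cons] at hy ⊢
            injection hy with ha hb
            injection ha with h1 h2
            rw [h2, hb]
      · -- break right after x: emit [x, x] and recurse
        rw [if_neg h]
        simp only [runSplit, if_neg h]
        simp only [List.cons_append, List.nil_append, List.map_cons, List.zip_cons_cons]
        rw [← altGo_eq] at hy
        exact congrArg (List.cons [x, x]) hy

-- ===== VERDICT (by name: the statement is the Claim_ definition above) =====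
theorem regulate_clip_layers_list_spec : Claim_equal_regulate_clip_layers_list := by
  intro clip_layers _ hpre
  unfold Spec_regulate_clip_layers_list
  match clip_layers with
  | [] => exact absurd rfl hpre
  | x :: xs =>
      show (aLoop [] x x xs).1 ++ [[(aLoop [] x x xs).2.1, (aLoop [] x x xs).2.2]] = _
      rw [aLoop_eq_altGo xs [] x x]
      have hb := b_zip_eq_altGo xs x
      simp only [bBreaks, List.tail_cons] at hb
      unfold regulate_clip_layers_list_alt
      simp only [PySem.List.slice_from_one, List.tail_cons, PySem.List.pyGet?_zero_cons,
        Option.getD_some]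
      rw [hb, altGo_eq]
      simp
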